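-- pv_equiv track=rewrite | github.com/saloftus-lang/VESSIQ | vessiq/parsers/edi322.py | _split_transactions
-- ===== SOURCE A (Python) =====
-- def _split_transactions(segments: list[str]) -> list[list[str]]:
--     """Group segments into individual ST/SE transaction sets."""
--     transactions: list[list[str]] = []
--     current: list[str] = []
--     in_txn = False
--
--     for seg in segments:
--         tag = seg.split("*")[0] if "*" in seg else seg[:3]
--         if tag == "ST":
--             in_txn = True
--             current = [seg]
--         elif tag == "SE":
--             if in_txn:
--                 current.append(seg)
--                 transactions.append(current)
--                 current = []
--                 in_txn = False
--         elif in_txn: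
--             current.append(seg)
--
--     return transactions
-- ===== SOURCE B (Python) =====
-- def _split_transactions(segments: list[str]) -> list[list[str]]:
--     """Group segments into individual ST/SE transaction sets."""
--     transactions: list[list[str]] = []
--     start = None
--
--     for i, seg in enumerate(segments):
--         tag = seg.split("*")[0] if "*" in seg else seg[:3]
--         if tag == "ST":
--             start = i
--         elif tag == "SE":
--             if start is not None:
--                 transactions.append(segments[start:i + 1])
--                 start = None
--
--     return transactions
-- ===== Notes on version B (the rewrite author's own statement) =====
-- stated objective: simpler
-- what changed: Replaces A's maintained partial transaction list plus in_txn flag by tracking only the index of the latest ST and slicing segments[start:i+1] at each SE, dropping the intermediate-append branch.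
import Mathlib
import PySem

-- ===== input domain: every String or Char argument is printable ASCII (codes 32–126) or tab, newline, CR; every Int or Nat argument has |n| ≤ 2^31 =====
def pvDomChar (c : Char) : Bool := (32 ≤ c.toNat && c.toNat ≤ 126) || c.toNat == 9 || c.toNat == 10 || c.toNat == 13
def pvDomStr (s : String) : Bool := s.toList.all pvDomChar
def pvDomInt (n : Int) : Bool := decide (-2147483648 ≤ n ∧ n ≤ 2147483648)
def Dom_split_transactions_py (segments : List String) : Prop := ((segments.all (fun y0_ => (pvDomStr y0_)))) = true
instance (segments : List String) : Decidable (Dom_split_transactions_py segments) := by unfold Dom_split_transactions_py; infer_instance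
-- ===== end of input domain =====

-- B replaces A's segment-by-segment accumulation (partial list + in_txn flag) by tracking only
-- the index of the latest ST and slicing segments[start:i+1] at each SE: simpler state, one fewer branch.


-- shared by both ports: the identical Python expression
-- `seg.split("*")[0] if "*" in seg else seg[:3]` appearing verbatim in A and B
def pvTag (seg : String) : String :=
  if PySem.Str.isIn "*" seg then ((PySem.Str.split? seg "*").getD []).headD ""
  else PySem.Str.slice seg none (some 3)

-- ===== PORT A =====
def pvStepA (st : List (List String) × List String × Bool) (seg : String) :
    List (List String) × List String × Bool :=
  let tag := pvTag seg
  if tag == "ST" then (st.1, [seg], true)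
  else if tag == "SE" then
    if st.2.2 then (st.1 ++ [st.2.1 ++ [seg]], [], false) else st
  else if st.2.2 then (st.1, st.2.1 ++ [seg], st.2.2) else st

def split_transactions_py (segments : List String) : List (List String) :=
  (segments.foldl pvStepA ([], [], false)).1

-- ===== PORT B =====
def pvStepB (segments : List String) (st : List (List String) × Option Int) (p : Int × String) :
    List (List String) × Option Int :=
  let tag := pvTag p.2
  if tag == "ST" then (st.1, some p.1)
  else if tag == "SE" then
    match st.2 with
    | some k => (st.1 ++ [PySem.List.slice segments (some k) (some (p.1 + 1))], none)
    | none => st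
  else st

def split_transactions_py_alt (segments : List String) : List (List String) :=
  ((PySem.List.enumerate segments 0).foldl (pvStepB segments) ([], none)).1

-- ===== PRECONDITION & SPEC =====
def Spec_split_transactions_py (segments : List String) (out : List (List String)) : Prop := out = split_transactions_py_alt segments
instance (segments : List String) (out : List (List String)) : Decidable (Spec_split_transactions_py segments out) := by unfold Spec_split_transactions_py; infer_instance

-- ===== CLAIM (what is proved, stated in full; the proofs are below) =====
def Claim_equal_split_transactions_py : Prop := ∀ (segments : List String), Dom_split_transactions_py segments → Spec_split_transactions_py segments (split_transactions_py segments)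

-- ===== LEMMAS AND PROOFS =====

-- Invariant relating A's (current, in_txn) to B's start index at position i.
def pvRel (segments : List String) (i : Nat) (cur : List String) (flag : Bool)
    (st? : Option Int) : Prop :=
  (flag = false ∧ st? = none) ∨
  (flag = true ∧ ∃ k : Nat, st? = some (k : Int) ∧ k ≤ i ∧ cur = (segments.take i).drop k)

theorem pv_take_succ_drop {segments : List String} {i k : Nat} {seg : String}
    (hk : k ≤ i) (hdrop : segments.drop i = seg :: (segments.drop (i+1))) :
    (segments.take (i+1)).drop k = (segments.take i).drop k ++ [seg] := by
  have hi : i < segments.length := by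
    by_contra h
    have : segments.drop i = [] := List.drop_eq_nil_of_le (by omega)
    simp [this] at hdrop
  have hget : segments[i]? = some seg := by
    have := congrArg (fun l => l.head?) hdrop
    simpa [List.head?_drop] using this
  have : segments.take (i+1) = segments.take i ++ [seg] := by
    rw [List.take_add_one]; simp [hget]
  rw [this, List.drop_append_of_le_length (by simp [List.length_take]; omega)]

theorem pv_main (rest : List String) : ∀ (segments : List String) (i : Nat)
    (acc : List (List String)) (cur : List String) (flag : Bool) (st? : Option Int),
    segments.drop i = rest → pvRel segments i cur flag st? →
    (rest.foldl pvStepA (acc, cur, flag)).1 =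
      ((PySem.List.enumerate rest (i : Int)).foldl (pvStepB segments) (acc, st?)).1 := by
  induction rest with
  | nil => intro _ _ _ _ _ _ _ _; simp [PySem.List.enumerate]
  | cons seg rest ih =>
    intro segments i acc cur flag st? hdrop hrel
    have hdrop' : segments.drop (i+1) = rest := by
      have := congrArg List.tail hdrop
      simpa [List.tail_drop] using this
    have hdrop2 : segments.drop i = seg :: segments.drop (i+1) := by rw [hdrop', hdrop]
    rw [PySem.List.enumerate_cons]
    simp only [List.foldl_cons]
    by_cases hST : pvTag seg == "ST"
    · have hA : pvStepA (acc, cur, flag) seg = (acc, [seg], true) := by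
        simp [pvStepA, hST]
      have hB : pvStepB segments (acc, st?) ((i : Int), seg) = (acc, some (i : Int)) := by
        simp [pvStepB, hST]
      rw [hA, hB]
      have : (i : Int) + 1 = ((i + 1 : Nat) : Int) := by push_cast; ring
      rw [this]
      exact ih segments (i+1) acc [seg] true (some (i : Int)) hdrop'
        (Or.inr ⟨rfl, i, rfl, Nat.le_succ i,
          by rw [pv_take_succ_drop (le_refl i) hdrop2]; simp⟩)
    · by_cases hSE : pvTag seg == "SE"
      · cases hrel with
        | inl h =>
          obtain ⟨hf, hs⟩ := h
          have hA : pvStepA (acc, cur, flag) seg = (acc, cur, flag) := by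
            simp [pvStepA, hST, hSE, hf]
          have hB : pvStepB segments (acc, st?) ((i : Int), seg) = (acc, st?) := by
            simp [pvStepB, hST, hSE, hs]
          rw [hA, hB]
          have : (i : Int) + 1 = ((i + 1 : Nat) : Int) := by push_cast; ring
          rw [this]
          exact ih segments (i+1) acc cur flag st? hdrop' (Or.inl ⟨hf, hs⟩)
        | inr h =>
          obtain ⟨hf, k, hs, hk, hcur⟩ := h
          have hA : pvStepA (acc, cur, flag) seg = (acc ++ [cur ++ [seg]], [], false) := by
            simp [pvStepA, hST, hSE, hf]
          have hslice : PySem.List.slice segments (some (k : Int)) (some ((i : Int) + 1)) =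
              cur ++ [seg] := by
            have h1 : (i : Int) + 1 = ((i + 1 : Nat) : Int) := by push_cast; ring
            rw [h1, PySem.List.slice_natCast, hcur, ← pv_take_succ_drop hk hdrop2,
              List.drop_take]
          have hB : pvStepB segments (acc, st?) ((i : Int), seg) =
              (acc ++ [cur ++ [seg]], none) := by
            simp [pvStepB, hST, hSE, hs, hslice]
          rw [hA, hB]
          have : (i : Int) + 1 = ((i + 1 : Nat) : Int) := by push_cast; ring
          rw [this]
          exact ih segments (i+1) (acc ++ [cur ++ [seg]]) [] false none hdrop'
            (Or.inl ⟨rfl, rfl⟩)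
      · have hB : pvStepB segments (acc, st?) ((i : Int), seg) = (acc, st?) := by
          simp [pvStepB, hST, hSE]
        cases hrel with
        | inl h =>
          obtain ⟨hf, hs⟩ := h
          have hA : pvStepA (acc, cur, flag) seg = (acc, cur, flag) := by
            simp [pvStepA, hST, hSE, hf]
          rw [hA, hB]
          have : (i : Int) + 1 = ((i + 1 : Nat) : Int) := by push_cast; ring
          rw [this]
          exact ih segments (i+1) acc cur flag st? hdrop' (Or.inl ⟨hf, hs⟩)
        | inr h =>
          obtain ⟨hf, k, hs, hk, hcur⟩ := h
          have hA : pvStepA (acc, cur, flag) seg = (acc, cur ++ [seg], flag) := by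
            simp [pvStepA, hST, hSE, hf]
          rw [hA, hB]
          have : (i : Int) + 1 = ((i + 1 : Nat) : Int) := by push_cast; ring
          rw [this]
          exact ih segments (i+1) acc (cur ++ [seg]) flag st? hdrop'
            (Or.inr ⟨hf, k, hs, by omega,
              by rw [pv_take_succ_drop hk hdrop2, hcur]⟩)

-- ===== VERDICT (by name: the statement is the Claim_ definition above) =====
theorem split_transactions_py_spec : Claim_equal_split_transactions_py := by
  intro segments _
  unfold Spec_split_transactions_py split_transactions_py split_transactions_py_alt
  exact pv_main segments segments 0 [] [] false none (by simp) (Or.inl ⟨rfl, rfl⟩)
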